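-- pv_equiv track=rewrite | github.com/Darshil-Solanki/LeetCode | contest/validElementsInAnArray.py | findValidElements
-- ===== SOURCE A (Python) =====
-- def findValidElements(nums: list[int]) -> list[int]:
--     temp = []
--     n = len(nums)
--     taken = [False]*n
--     prev_max = 0
--     for i, num in enumerate(nums):
--         if num>prev_max:
--             temp.append((i, num))
--             prev_max = num
--             taken[i] = True
--     prev_max = 0
--     for i in range(n-1, -1, -1):
--         if nums[i]>prev_max and not taken[i]:
--             temp.append((i, nums[i]))
--         prev_max = max(nums[i], prev_max)
--
--     temp.sort()
--     return [num for i, num in temp]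
-- ===== SOURCE B (Python) =====
-- def findValidElements(nums: list[int]) -> list[int]:
--     # One O(n) backward pass records, for each position, the max of the elements
--     # after it (floored at 0); one O(n) forward pass then emits, in index order,
--     # every element strictly greater than its prefix max or its suffix max.
--     # No taken[] array and no sort.
--     suf = []
--     m = 0
--     for v in reversed(nums):
--         suf.append(m)
--         if v > m:
--             m = v
--     suf.reverse()
--     res = []
--     m = 0
--     for v, s in zip(nums, suf):
--         if v > m or v > s:
--             res.append(v)
--         if v > m:
--             m = v
--     return res
-- ===== Notes on version B (the rewrite author's own statement) =====
-- stated objective: faster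
-- what changed: Replaces the taken[] array, the two appended index-tagged lists and the final sort by a suffix-max array plus a single forward pass that emits qualifying values already in index order, dropping the O(n log n) sort.
import Mathlib
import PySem

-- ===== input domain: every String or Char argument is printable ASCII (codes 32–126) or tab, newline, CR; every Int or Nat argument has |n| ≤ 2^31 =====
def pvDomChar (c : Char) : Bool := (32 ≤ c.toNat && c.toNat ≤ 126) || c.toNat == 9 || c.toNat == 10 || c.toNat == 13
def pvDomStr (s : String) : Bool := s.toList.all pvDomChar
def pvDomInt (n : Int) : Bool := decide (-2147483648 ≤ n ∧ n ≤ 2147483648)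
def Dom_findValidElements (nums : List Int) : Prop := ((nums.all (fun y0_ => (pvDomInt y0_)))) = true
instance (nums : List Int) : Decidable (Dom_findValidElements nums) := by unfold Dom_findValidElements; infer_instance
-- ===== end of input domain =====

-- B replaces A's taken[] bookkeeping plus final sort by a suffix-max array and one
-- in-order forward pass (no sort); proved to return the same list on every input.


-- ===== PORT A =====
-- literal port of A: forward pass appending (i, num) and setting taken[i]; backward
-- index loop over range(n-1, -1, -1); temp.sort() (pairs, lexicographic); map snd.
-- nums[i] / taken[i] are ported with pyGetD (exact: i is drawn from range(n-1,-1,-1),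
-- always in range), taken[i] = True with pySetD (exact: i from enumerate, in range).
def findValidElements (nums : List Int) : List Int :=
  let n : Int := PySem.List.len nums
  let st1 := (PySem.List.enumerate nums).foldl
    (fun (st : List (Int × Int) × Int × List Bool) iv =>
      if iv.2 > st.2.1 then
        (st.1 ++ [(iv.1, iv.2)], iv.2, PySem.List.pySetD st.2.2 iv.1 true)
      else st)
    ([], 0, List.replicate n.toNat false)
  let st2 := (PySem.List.pyRange (n - 1) (-1) (-1)).foldl
    (fun (st : List (Int × Int) × Int) i =>
      ((if PySem.List.pyGetD nums i 0 > st.2 ∧ PySem.List.pyGetD st1.2.2 i false = false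
          then st.1 ++ [(i, PySem.List.pyGetD nums i 0)] else st.1),
       max (PySem.List.pyGetD nums i 0) st.2))
    (st1.1, 0)
  (PySem.List.sorted2 st2.1 (fun p => p.1) (fun p => p.2)).map (fun p => p.2)

-- ===== PORT B =====
-- literal port of B (Source B): build suf by one pass over reversed(nums), reverse it,
-- then one forward pass over zip(nums, suf) appending qualifying values in order.
def findValidElements_alt (nums : List Int) : List Int :=
  let st1 := nums.reverse.foldl
    (fun (st : List Int × Int) v =>
      (st.1 ++ [st.2], if v > st.2 then v else st.2)) ([], 0)
  let suf := st1.1.reverse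
  let st2 := (nums.zip suf).foldl
    (fun (st : List Int × Int) vs =>
      ((if vs.1 > st.2 ∨ vs.1 > vs.2 then st.1 ++ [vs.1] else st.1),
       if vs.1 > st.2 then vs.1 else st.2)) ([], 0)
  st2.1

-- ===== PRECONDITION & SPEC =====
def Spec_findValidElements (nums : List Int) (out : List Int) : Prop := out = findValidElements_alt nums
instance (nums : List Int) (out : List Int) : Decidable (Spec_findValidElements nums out) := by unfold Spec_findValidElements; infer_instance

-- ===== CLAIM (what is proved, stated in full; the proofs are below) =====
def Claim_equal_findValidElements : Prop := ∀ (nums : List Int), Dom_findValidElements nums → Spec_findValidElements nums (findValidElements nums)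


-- ===== LEMMAS AND PROOFS =====

-- generic max-fold facts
theorem pvIfMax (a b : Int) : (if b > a then b else a) = max a b := by
  rw [max_def]; split_ifs <;> omega

theorem pvFoldlMaxComm : ∀ (l : List Int) (a b : Int),
    l.foldl max (max a b) = max a (l.foldl max b) := by
  intro l
  induction l with
  | nil => intro a b; rfl
  | cons v t ih =>
      intro a b
      simp only [List.foldl_cons]
      rw [max_assoc, ih]

theorem pvFoldlMaxRev : ∀ (l : List Int) (a : Int),
    l.reverse.foldl max a = l.foldl max a := by
  intro l
  induction l with
  | nil => intro a; rfl
  | cons v t ih =>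
      intro a
      simp only [List.reverse_cons, List.foldl_append, List.foldl_cons, List.foldl_nil,
        List.foldl_cons, ih]
      rw [max_comm]; rw [← pvFoldlMaxComm]; rw [max_comm v a]

-- the "running max" with Python's if, as a foldl
def pvIfold (m : Int) (l : List Int) : Int := l.foldl (fun p v => if v > p then v else p) m

theorem pvIfold_eq (l : List Int) : ∀ m, pvIfold m l = l.foldl max m := by
  induction l with
  | nil => intro m; rfl
  | cons v t ih => intro m; simp only [pvIfold, List.foldl_cons] at *; rw [pvIfMax, ih]

-- index conditions: strict over prefix max (seed prev), strict over suffix max (seed 0)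
def Fc (nums : List Int) (prev : Int) (k : Nat) : Bool :=
  decide ((nums.take k).foldl max prev < nums.getD k 0)
def Sc (nums : List Int) (k : Nat) : Bool :=
  decide ((nums.drop (k+1)).foldl max 0 < nums.getD k 0)

theorem Fc_zero (v : Int) (t : List Int) (prev : Int) :
    Fc (v :: t) prev 0 = decide (prev < v) := by simp [Fc]

theorem Fc_succ (v : Int) (t : List Int) (prev : Int) (k : Nat) :
    Fc (v :: t) prev (k+1) = Fc t (max prev v) k := by
  simp [Fc, List.take_succ_cons]

theorem Sc_zero (v : Int) (t : List Int) :
    Sc (v :: t) 0 = decide (t.foldl max 0 < v) := by simp [Sc]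

theorem Sc_succ (v : Int) (t : List Int) (k : Nat) :
    Sc (v :: t) (k+1) = Sc t k := by simp [Sc]

-- ---------- A's forward loop ----------
def fwdP (s prev : Int) : List Int → List (Int × Int)
  | [] => []
  | v :: t => if v > prev then (s, v) :: fwdP (s+1) v t else fwdP (s+1) prev t

def fwdTk (s prev : Int) (taken : List Bool) : List Int → List Bool
  | [] => taken
  | v :: t =>
      if v > prev then fwdTk (s+1) v (PySem.List.pySetD taken s true) t
      else fwdTk (s+1) prev taken t

theorem fwd_loop (xs : List Int) : ∀ (s prev : Int) (temp : List (Int × Int)) (taken : List Bool),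
    (PySem.List.enumerate xs s).foldl
      (fun (st : List (Int × Int) × Int × List Bool) iv =>
        if iv.2 > st.2.1 then
          (st.1 ++ [(iv.1, iv.2)], iv.2, PySem.List.pySetD st.2.2 iv.1 true)
        else st)
      (temp, prev, taken)
    = (temp ++ fwdP s prev xs, pvIfold prev xs, fwdTk s prev taken xs) := by
  induction xs with
  | nil => intro s prev temp taken; simp [PySem.List.enumerate, fwdP, fwdTk, pvIfold]
  | cons v t ih =>
      intro s prev temp taken
      rw [PySem.List.enumerate_cons]
      simp only [List.foldl_cons]
      by_cases h : v > prev
      · rw [if_pos h, ih]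
        simp [fwdP, fwdTk, pvIfold, if_pos h]
      · rw [if_neg h, ih]
        simp [fwdP, fwdTk, pvIfold, if_neg h]

theorem fwdP_eq (xs : List Int) : ∀ (s prev : Int),
    fwdP s prev xs
    = ((List.range xs.length).filter (Fc xs prev)).map (fun (k : Nat) => (s + (k:Int), xs.getD k 0)) := by
  induction xs with
  | nil => intro s prev; simp [fwdP]
  | cons v t ih =>
      intro s prev
      rw [List.length_cons, List.range_succ_eq_map]
      rw [List.filter_cons, List.filter_map]
      have hcomp : (Fc (v :: t) prev ∘ Nat.succ) = Fc t (max prev v) := by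
        funext k; simp [Function.comp, Fc_succ]
      rw [hcomp]
      by_cases h : v > prev
      · have : Fc (v :: t) prev 0 = true := by rw [Fc_zero]; simp [h]
        simp only [fwdP, if_pos h, this]
        rw [ih (s+1) v]
        have hmax : max prev v = v := by omega
        rw [hmax]
        simp only [if_true, List.map_cons, List.map_map]
        congr 1
        · simp
        · apply List.map_congr_left; intro k _
          simp only [Function.comp_apply, Prod.mk.injEq, List.getD_cons_succ]
          refine ⟨by push_cast; ring, trivial⟩
      · have : Fc (v :: t) prev 0 = false := by rw [Fc_zero]; simp; omega
        simp only [fwdP, if_neg h, this]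
        rw [ih (s+1) prev]
        have hmax : max prev v = prev := by omega
        rw [hmax]
        rw [if_neg (by simp)]
        simp only [List.map_map]
        apply List.map_congr_left; intro k _
        simp only [Function.comp_apply, Prod.mk.injEq, List.getD_cons_succ]
        refine ⟨by push_cast; ring, trivial⟩

theorem pvGetDSet (l : List Bool) (n j : Nat) (a d : Bool) (hn : n < l.length) :
    (l.set n a).getD j d = if n = j then a else l.getD j d := by
  simp [List.getD, List.getElem?_set, hn]
  split_ifs <;> simp

theorem fwdTk_getD (xs : List Int) : ∀ (s : Nat) (prev : Int) (taken : List Bool) (j : Nat),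
    s + xs.length ≤ taken.length →
    (fwdTk (s:Int) prev taken xs).getD j false
    = ((decide (s ≤ j) && decide (j < s + xs.length) && Fc xs prev (j - s))
        || taken.getD j false) := by
  induction xs with
  | nil =>
      intro s prev taken j _
      simp [fwdTk]
  | cons v t ih =>
      intro s prev taken j hlen
      have hlen' : s < taken.length := by simp at hlen; omega
      by_cases h : v > prev
      · have hstep : fwdTk (↑s) prev taken (v :: t)
            = fwdTk ((s+1 : Nat) : Int) v (taken.set s true) t := by
          simp [fwdTk, h]
        rw [hstep, ih (s+1) v (taken.set s true) j (by simp [List.length_set]; simp at hlen; omega)]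
        rw [pvGetDSet taken s j true false hlen']
        by_cases hj : j = s
        · subst hj
          have c1 : j < j + (t.length + 1) := by omega
          have c2 : ¬ (j + 1 ≤ j) := by omega
          simp [c1, c2, Fc_zero, h]
        · rw [if_neg (fun hh => hj hh.symm)]
          by_cases h1 : s + 1 ≤ j
          · by_cases h2 : j < s + 1 + t.length
            · have e1 : j - s = (j - (s+1)) + 1 := by omega
              have e2 : Fc (v::t) prev (j - s) = Fc t v (j - (s+1)) := by
                rw [e1, Fc_succ, max_eq_right (le_of_lt h)]
              have c1 : s ≤ j := by omega
              have c2 : j < s + (t.length + 1) := by omega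
              simp [e2, h1, h2, c1, c2]
            · have c2 : ¬ (j < s + (t.length + 1)) := by omega
              simp [h2, c2]
          · have hjs : ¬ (s ≤ j) := by omega
            simp [h1, hjs]
      · have hstep : fwdTk (↑s) prev taken (v :: t)
            = fwdTk ((s+1 : Nat) : Int) prev taken t := by
          simp [fwdTk, h]
        rw [hstep, ih (s+1) prev taken j (by simp at hlen ⊢; omega)]
        by_cases hj : j = s
        · subst hj
          have c2 : ¬ (j + 1 ≤ j) := by omega
          have hf : Fc (v::t) prev 0 = false := by rw [Fc_zero]; simp; omega
          simp [c2, hf]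
        · by_cases h1 : s + 1 ≤ j
          · by_cases h2 : j < s + 1 + t.length
            · have e1 : j - s = (j - (s+1)) + 1 := by omega
              have e2 : Fc (v::t) prev (j - s) = Fc t prev (j - (s+1)) := by
                rw [e1, Fc_succ, max_eq_left (by omega)]
              have c1 : s ≤ j := by omega
              have c2 : j < s + (t.length + 1) := by omega
              simp [e2, h1, h2, c1, c2]
            · have c2 : ¬ (j < s + (t.length + 1)) := by omega
              simp [h2, c2]
          · have hjs : ¬ (s ≤ j) := by omega
            simp [h1, hjs]

-- ---------- A's backward loop ----------
def bwd (nums : List Int) (tk : List Bool) : Int → Nat → List (Int × Int)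
  | _, 0 => []
  | prev, (m+1) =>
      (if nums.getD m 0 > prev ∧ tk.getD m false = false
        then [((m:Int), nums.getD m 0)] else [])
      ++ bwd nums tk (max (nums.getD m 0) prev) m

def bmax (nums : List Int) : Int → Nat → Int
  | prev, 0 => prev
  | prev, m+1 => bmax nums (max (nums.getD m 0) prev) m

theorem bwd_loop (nums : List Int) (tk : List Bool) : ∀ (m : Nat) (temp : List (Int × Int)) (prev : Int),
    ((List.range m).reverse.foldl
      (fun (st : List (Int × Int) × Int) (k : Nat) =>
        ((if nums.getD k 0 > st.2 ∧ tk.getD k false = false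
            then st.1 ++ [((k:Int), nums.getD k 0)] else st.1),
         max (nums.getD k 0) st.2)) (temp, prev))
    = (temp ++ bwd nums tk prev m, bmax nums prev m) := by
  intro m
  induction m with
  | zero => intro temp prev; simp [bwd, bmax]
  | succ m ih =>
      intro temp prev
      rw [List.range_succ, List.reverse_append]
      simp only [List.reverse_singleton, List.singleton_append, List.foldl_cons]
      rw [ih]
      simp only [bwd, bmax]
      by_cases h : nums.getD m 0 > prev ∧ tk.getD m false = false
      · simp only [if_pos h]; simp [List.append_assoc]
      · simp only [if_neg h]; simp

theorem bwd_eq (nums : List Int) (tk : List Bool) : ∀ (m : Nat), m ≤ nums.length → ∀ (prev : Int),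
    bwd nums tk prev m
    = (((List.range m).filter
          (fun k => decide (((nums.take m).drop (k+1)).foldl max prev < nums.getD k 0)
                    && !tk.getD k false)).map
        (fun (k : Nat) => ((k:Int), nums.getD k 0))).reverse := by
  intro m
  induction m with
  | zero => intro _ prev; simp [bwd]
  | succ m ih =>
      intro hm prev
      have hmlt : m < nums.length := by omega
      have hseg : ∀ k : Nat, k < m →
          ((nums.take (m+1)).drop (k+1)).foldl max prev
          = ((nums.take m).drop (k+1)).foldl max (max (nums.getD m 0) prev) := by
        intro k hk
        have htake : nums.take (m+1) = nums.take m ++ [nums.getD m 0] := by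
          rw [List.take_succ]
          congr 1
          rw [List.getElem?_eq_getElem hmlt]
          simp [List.getD, List.getElem?_eq_getElem hmlt]
        rw [htake, List.drop_append_of_le_length (by simp [List.length_take]; omega)]
        rw [List.foldl_append]
        simp only [List.foldl_cons, List.foldl_nil]
        rw [pvFoldlMaxComm, max_comm]
      have hcongr : (List.filter
            (fun k => decide (((nums.take (m+1)).drop (k+1)).foldl max prev < nums.getD k 0)
                      && !tk.getD k false) (List.range m))
          = (List.filter
            (fun k => decide (((nums.take m).drop (k+1)).foldl max (max (nums.getD m 0) prev) < nums.getD k 0)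
                      && !tk.getD k false) (List.range m)) := by
        apply List.filter_congr
        intro k hk
        rw [hseg k (List.mem_range.mp hk)]
      have hlast : ((nums.take (m+1)).drop (m+1)).foldl max prev = prev := by
        have : (nums.take (m+1)).drop (m+1) = [] := by
          apply List.drop_eq_nil_of_le
          simp [List.length_take]
        rw [this]; rfl
      rw [List.range_succ, List.filter_append, List.filter_singleton]
      simp only [bwd]
      rw [ih (by omega) (max (nums.getD m 0) prev), hcongr]
      by_cases h : nums.getD m 0 > prev ∧ tk.getD m false = false
      · have hb : (decide (((nums.take (m+1)).drop (m+1)).foldl max prev < nums.getD m 0)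
            && !tk.getD m false) = true := by
          rw [hlast]; revert h; simp [List.getD]
        rw [if_pos h, hb]
        simp
      · have hb : (decide (((nums.take (m+1)).drop (m+1)).foldl max prev < nums.getD m 0)
            && !tk.getD m false) = false := by
          rw [hlast]; revert h; simp [List.getD]
        rw [if_neg h, hb]
        simp

-- ---------- sorted2 on pairs with strictly increasing first components ----------
def pvLt (a b : Int × Int) : Bool :=
  decide (a.1 < b.1) || (!decide (b.1 < a.1) && decide (a.2 < b.2))

def pvLe (a b : Int × Int) : Prop := pvLt a b = true ∨ a = b

theorem pvLt_iff (a b : Int × Int) :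
    pvLt a b = true ↔ (a.1 < b.1 ∨ (a.1 = b.1 ∧ a.2 < b.2)) := by
  simp only [pvLt, Bool.or_eq_true, Bool.and_eq_true, Bool.not_eq_true', decide_eq_true_eq,
    decide_eq_false_iff_not]
  omega

theorem pvLe_of_not_lt (a b : Int × Int) (h : pvLt a b = false) : pvLe b a := by
  have h' : ¬ (a.1 < b.1 ∨ (a.1 = b.1 ∧ a.2 < b.2)) := by
    rw [← pvLt_iff]; simp [h]
  by_cases hb : b.1 < a.1 ∨ (b.1 = a.1 ∧ b.2 < a.2)
  · exact Or.inl ((pvLt_iff b a).mpr hb)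
  · right
    have h1 : b.1 = a.1 := by omega
    have h2 : b.2 = a.2 := by omega
    exact Prod.ext h1 h2

theorem pvLe_of_lt_of_le (x y z : Int × Int) (hxy : pvLt x y = true) (hyz : pvLe y z) :
    pvLe x z := by
  rcases hyz with hyz | rfl
  · left
    rw [pvLt_iff] at *
    omega
  · exact Or.inl hxy

theorem insertBy_pairwise (x : Int × Int) : ∀ (acc : List (Int × Int)),
    acc.Pairwise pvLe → (PySem.List.insertBy pvLt x acc).Pairwise pvLe := by
  intro acc
  induction acc with
  | nil => intro _; simp [PySem.List.insertBy]
  | cons y ys ih =>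
      intro h
      rw [List.pairwise_cons] at h
      obtain ⟨hy, hys⟩ := h
      by_cases hxy : pvLt x y = true
      · rw [show PySem.List.insertBy pvLt x (y :: ys) = x :: y :: ys from by
            simp [PySem.List.insertBy, hxy]]
        rw [List.pairwise_cons]
        refine ⟨?_, List.pairwise_cons.mpr ⟨hy, hys⟩⟩
        intro z hz
        rcases List.mem_cons.mp hz with rfl | hz
        · exact Or.inl hxy
        · exact pvLe_of_lt_of_le x y z hxy (hy z hz)
      · rw [show PySem.List.insertBy pvLt x (y :: ys) = y :: PySem.List.insertBy pvLt x ys from by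
            simp [PySem.List.insertBy, hxy]]
        rw [List.pairwise_cons]
        refine ⟨?_, ih hys⟩
        intro z hz
        rcases (PySem.List.mem_insertBy pvLt x z ys).mp hz with hzx | hz'
        · rw [hzx]; exact pvLe_of_not_lt x y (by simpa using hxy)
        · exact hy z hz'

theorem foldl_insertBy_pairwise (xs : List (Int × Int)) : ∀ (acc : List (Int × Int)),
    acc.Pairwise pvLe →
    (xs.foldl (fun acc x => PySem.List.insertBy pvLt x acc) acc).Pairwise pvLe := by
  induction xs with
  | nil => intro acc h; simpa using h
  | cons x t ih =>
      intro acc h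
      simp only [List.foldl_cons]
      exact ih _ (insertBy_pairwise x acc h)

theorem pvLe_antisymm : ∀ (a b : Int × Int), pvLe a b → pvLe b a → a = b := by
  intro a b hab hba
  rcases hab with hab | rfl
  · rcases hba with hba | rfl
    · rw [pvLt_iff] at *
      have h1 : a.1 = b.1 := by omega
      have h2 : a.2 = b.2 := by omega
      exact Prod.ext h1 h2
    · rfl
  · rfl

theorem sorted2_eq (xs ys : List (Int × Int)) (hperm : ys.Perm xs)
    (hpw : ys.Pairwise (fun a b => a.1 < b.1)) :
    PySem.List.sorted2 xs (fun p => p.1) (fun p => p.2) = ys := by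
  have hdef : PySem.List.sorted2 xs (fun p => p.1) (fun p => p.2)
      = xs.foldl (fun acc x => PySem.List.insertBy pvLt x acc) [] := rfl
  have hsorted : (PySem.List.sorted2 xs (fun p => p.1) (fun p => p.2)).Pairwise pvLe := by
    rw [hdef]
    exact foldl_insertBy_pairwise xs [] List.Pairwise.nil
  have hperm2 : (PySem.List.sorted2 xs (fun p => p.1) (fun p => p.2)).Perm ys :=
    (PySem.List.sorted2_perm xs (fun p => p.1) (fun p => p.2) false).trans hperm.symm
  have hys : ys.Pairwise pvLe := by
    apply hpw.imp
    intro a b hab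
    exact Or.inl ((pvLt_iff a b).mpr (Or.inl hab))
  exact List.eq_of_perm_of_sorted (fun a b _ _ => pvLe_antisymm a b) hsorted hys hperm2

-- ---------- splitting a filter by the two disjuncts ----------
theorem filter_or_perm {α : Type} (p q : α → Bool) : ∀ (l : List α),
    (l.filter (fun x => p x || q x)).Perm
      (l.filter p ++ l.filter (fun x => q x && !p x)) := by
  intro l
  induction l with
  | nil => simp
  | cons x t ih =>
      by_cases hp : p x = true
      · simp only [List.filter_cons, hp, Bool.true_or, Bool.not_true, Bool.and_false,
          if_true, if_false, List.cons_append]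
        exact ih.cons x
      · by_cases hq : q x = true
        · simp only [List.filter_cons, hp, hq, Bool.false_or, Bool.not_false, Bool.and_true,
            if_true, if_false]
          exact (ih.cons x).trans List.perm_middle.symm
        · simp only [List.filter_cons, hp, hq, Bool.false_or, Bool.false_and,
            if_false]
          exact ih

-- ---------- B's loops ----------
def blist (m : Int) : List Int → List Int
  | [] => []
  | v :: t => m :: blist (if v > m then v else m) t

def sufL (m : Int) : List Int → List Int
  | [] => []
  | _ :: t => t.foldl max m :: sufL m t

theorem b1_loop : ∀ (l : List Int) (acc : List Int) (m : Int),
    l.foldl (fun (st : List Int × Int) v => (st.1 ++ [st.2], if v > st.2 then v else st.2)) (acc, m)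
    = (acc ++ blist m l, pvIfold m l) := by
  intro l
  induction l with
  | nil => intro acc m; simp [blist, pvIfold]
  | cons v t ih =>
      intro acc m
      simp only [List.foldl_cons, ih, blist, pvIfold, List.append_assoc, List.singleton_append]

theorem blist_append : ∀ (xs ys : List Int) (m : Int),
    blist m (xs ++ ys) = blist m xs ++ blist (pvIfold m xs) ys := by
  intro xs
  induction xs with
  | nil => intro ys m; simp [blist, pvIfold]
  | cons v t ih =>
      intro ys m
      simp only [List.cons_append, blist, pvIfold, List.foldl_cons, ih]

theorem blist_rev : ∀ (l : List Int) (m : Int), (blist m l.reverse).reverse = sufL m l := by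
  intro l
  induction l with
  | nil => intro m; simp [blist, sufL]
  | cons v t ih =>
      intro m
      rw [List.reverse_cons, blist_append]
      simp only [blist, List.reverse_append, List.reverse_cons, List.reverse_nil,
        List.nil_append, List.singleton_append, List.cons_append]
      rw [ih]
      simp only [sufL]
      congr 1
      rw [pvIfold_eq, pvFoldlMaxRev]

def resR (prev : Int) : List (Int × Int) → List Int
  | [] => []
  | p :: t => (if p.1 > prev ∨ p.1 > p.2 then [p.1] else [])
              ++ resR (if p.1 > prev then p.1 else prev) t

theorem b2_loop : ∀ (l : List (Int × Int)) (acc : List Int) (m : Int),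
    l.foldl (fun (st : List Int × Int) vs =>
      ((if vs.1 > st.2 ∨ vs.1 > vs.2 then st.1 ++ [vs.1] else st.1),
       if vs.1 > st.2 then vs.1 else st.2)) (acc, m)
    = (acc ++ resR m l, (l.map Prod.fst).foldl (fun p v => if v > p then v else p) m) := by
  intro l
  induction l with
  | nil => intro acc m; simp [resR]
  | cons p t ih =>
      intro acc m
      simp only [List.foldl_cons, List.map_cons, ih, resR]
      by_cases h : p.1 > m ∨ p.1 > p.2
      · simp only [if_pos h, List.append_assoc, List.singleton_append]
      · simp only [if_neg h, List.nil_append]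

theorem resR_zip (nums : List Int) : ∀ (prev : Int),
    resR prev (nums.zip (sufL 0 nums))
    = ((List.range nums.length).filter (fun k => Fc nums prev k || Sc nums k)).map
        (fun k => nums.getD k 0) := by
  induction nums with
  | nil => intro prev; simp [sufL, resR]
  | cons v t ih =>
      intro prev
      have hz : (v :: t).zip (sufL 0 (v :: t)) = (v, t.foldl max 0) :: t.zip (sufL 0 t) := by
        simp [sufL]
      rw [hz]
      rw [show resR prev ((v, t.foldl max 0) :: t.zip (sufL 0 t))
          = (if v > prev ∨ v > t.foldl max 0 then [v] else [])
            ++ resR (if v > prev then v else prev) (t.zip (sufL 0 t)) from rfl]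
      rw [pvIfMax prev v, ih (max prev v)]
      rw [List.length_cons, List.range_succ_eq_map, List.filter_cons, List.filter_map]
      have hcomp : ((fun k => Fc (v :: t) prev k || Sc (v :: t) k) ∘ Nat.succ)
          = (fun k => Fc t (max prev v) k || Sc t k) := by
        funext k; simp [Function.comp, Fc_succ, Sc_succ]
      rw [hcomp]
      by_cases h : v > prev ∨ v > t.foldl max 0
      · have hb : (Fc (v :: t) prev 0 || Sc (v :: t) 0) = true := by
          rw [Fc_zero, Sc_zero]
          simp only [Bool.or_eq_true, decide_eq_true_eq]
          omega
        rw [if_pos h, hb, if_pos rfl]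
        simp only [List.map_cons, List.map_map, List.singleton_append]
        congr 1
      · have hb : (Fc (v :: t) prev 0 || Sc (v :: t) 0) = false := by
          rw [Fc_zero, Sc_zero]
          simp only [Bool.or_eq_false_iff, decide_eq_false_iff_not]
          omega
        rw [if_neg h, hb, if_neg (by simp)]
        simp only [List.map_map, List.nil_append]
        apply List.map_congr_left; intro k _
        simp [Function.comp]

-- ---------- the two ports against the common characterization ----------
theorem portA_eq (nums : List Int) :
    findValidElements nums
    = ((List.range nums.length).filter (fun k => Fc nums 0 k || Sc nums k)).map
        (fun k => nums.getD k 0) := by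
  simp only [findValidElements]
  rw [fwd_loop]
  simp only [List.nil_append, PySem.List.len_eq, Int.toNat_natCast]
  have hr : PySem.List.pyRange ((nums.length : Int) - 1) (-1) (-1)
      = ((List.range nums.length).reverse.map (fun (k : Nat) => ((k : Int)))) := by
    rw [PySem.List.pyRange_neg_one_eq_reverse]
    norm_num
    rw [PySem.List.pyRange_one]
    simp only [sub_zero, Int.toNat_natCast]
    apply List.map_congr_left
    intro k _
    simp
  rw [hr, List.foldl_map]
  simp only [PySem.List.pyGetD_natCast]
  rw [bwd_loop nums (fwdTk 0 0 (List.replicate nums.length false) nums)]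
  have htk : ∀ k : Nat, k < nums.length →
      (fwdTk 0 0 (List.replicate nums.length false) nums).getD k false = Fc nums 0 k := by
    intro k hk
    have h0 : ((0 : Nat) : Int) = (0 : Int) := by norm_num
    have := fwdTk_getD nums 0 0 (List.replicate nums.length false) k (by simp)
    rw [h0] at this
    rw [this]
    simp [hk]
  have hbwd : bwd nums (fwdTk 0 0 (List.replicate nums.length false) nums) 0 nums.length
      = (((List.range nums.length).filter (fun k => Sc nums k && !Fc nums 0 k)).map
          (fun (k : Nat) => ((k:Int), nums.getD k 0))).reverse := by
    rw [bwd_eq nums _ nums.length le_rfl 0]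
    congr 1
    congr 1
    apply List.filter_congr
    intro k hk
    rw [List.take_length, htk k (List.mem_range.mp hk)]
    rfl
  have hfwd : fwdP 0 0 nums
      = ((List.range nums.length).filter (Fc nums 0)).map
          (fun (k : Nat) => ((k:Int), nums.getD k 0)) := by
    rw [fwdP_eq]
    apply List.map_congr_left; intro k _; simp
  rw [hfwd, hbwd]
  rw [sorted2_eq _
      (((List.range nums.length).filter (fun k => Fc nums 0 k || Sc nums k)).map
        (fun (k : Nat) => ((k:Int), nums.getD k 0)))
      ?hperm ?hpw]
  case hperm =>
    refine ((filter_or_perm (Fc nums 0) (Sc nums) (List.range nums.length)).map _).trans ?_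
    rw [List.map_append]
    exact List.Perm.append_left _ (List.reverse_perm _).symm
  case hpw =>
    rw [List.pairwise_map]
    exact List.Pairwise.imp (fun h => by simp only []; exact_mod_cast h)
      (List.Pairwise.sublist List.filter_sublist List.pairwise_lt_range)
  rw [List.map_map]
  apply List.map_congr_left; intro k _; rfl

theorem portB_eq (nums : List Int) :
    findValidElements_alt nums
    = ((List.range nums.length).filter (fun k => Fc nums 0 k || Sc nums k)).map
        (fun k => nums.getD k 0) := by
  unfold findValidElements_alt
  rw [b1_loop]
  simp only [List.nil_append]
  rw [blist_rev]
  rw [b2_loop]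
  simp only [List.nil_append]
  exact resR_zip nums 0

-- ===== VERDICT (by name: the statement is the Claim_ definition above) =====
theorem findValidElements_spec : Claim_equal_findValidElements := by
  intro nums _
  unfold Spec_findValidElements
  rw [portA_eq, portB_eq]
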